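-- pv_equiv track=rewrite | github.com/HectorMorenoVeleiro/ProgramasDAM | ProgramasPythonDAM/EjerciciosLibro/yara.py | analizar_inventario
-- ===== SOURCE A (Python) =====
-- def analizar_inventario(productos):
--     # Si la lista está vacía, devolvemos el caso especial
--     if not productos:
--         return (0, "Sin productos")
--
--     valor_total = 0
--     producto_mas_caro = None
--     precio_mas_alto = 0
--
--     for nombre, cantidad, precio in productos:
--         # Sumar al valor total
--         valor_total += cantidad * precio
--
--         # Comprobar si este producto es el más caro
--         if precio > precio_mas_alto:
--             precio_mas_alto = precio
--             producto_mas_caro = nombre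
--
--     return (valor_total, producto_mas_caro)
-- ===== SOURCE B (Python) =====
-- def analizar_inventario(productos):
--     # Alternative algorithm: stable sort by price (descending) and take the head,
--     # which is the FIRST product with the maximal price (Python's sort is stable).
--     if not productos:
--         return (0, "Sin productos")
--     valor_total = sum(cantidad * precio for _, cantidad, precio in productos)
--     nombre, _, precio = sorted(productos, key=lambda x: x[2], reverse=True)[0]
--     return (valor_total, nombre if precio > 0 else None)
-- ===== Notes on version B (the rewrite author's own statement) =====
-- stated objective: alternative
-- what changed: Instead of a one-pass accumulator loop, B computes the total with sum() and finds the most expensive product by stably sorting the list by price in descending order and taking the head (first maximal element), returning None when that head's price is not positive.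
-- outside the precondition, e.g. on analizar_inventario([('a', 2, 0)]): A returns (0, None), B returns (0, None)
import Mathlib
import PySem

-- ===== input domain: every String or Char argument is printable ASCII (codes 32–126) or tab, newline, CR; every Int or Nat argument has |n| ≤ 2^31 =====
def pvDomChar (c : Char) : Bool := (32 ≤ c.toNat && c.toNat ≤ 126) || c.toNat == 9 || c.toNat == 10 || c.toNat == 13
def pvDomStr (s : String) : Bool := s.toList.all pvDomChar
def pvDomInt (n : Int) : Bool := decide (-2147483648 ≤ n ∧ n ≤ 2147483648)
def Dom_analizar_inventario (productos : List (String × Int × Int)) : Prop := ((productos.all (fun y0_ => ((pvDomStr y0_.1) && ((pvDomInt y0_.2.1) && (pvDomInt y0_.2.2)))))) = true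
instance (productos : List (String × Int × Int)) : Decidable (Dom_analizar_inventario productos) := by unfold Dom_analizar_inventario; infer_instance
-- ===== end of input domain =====

-- B replaces A's single accumulator loop by a different algorithm: sum() for the
-- total and a stable descending sort by price whose head is the first product with
-- the maximal price (return-value equivalence; neither version has side effects).


-- ===== PORT A =====
-- A's for-loop: one pass carrying (valor_total, producto_mas_caro, precio_mas_alto).
def aLoop : List (String × Int × Int) → Int × Option String × Int → Int × Option String × Int
  | [], s => s
  | (nombre, cantidad, precio) :: rest, (valor_total, producto_mas_caro, precio_mas_alto) =>
      aLoop rest (valor_total + cantidad * precio,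
        if precio_mas_alto < precio then some nombre else producto_mas_caro,
        if precio_mas_alto < precio then precio else precio_mas_alto)

def analizar_inventario (productos : List (String × Int × Int)) : Int × String :=
  if productos = [] then (0, "Sin productos")
  else
    let s := aLoop productos (0, none, 0)
    -- Python returns None (not a str) when no price is positive; Pre_ excludes that,
    -- so the Option is some there and .getD "" is never the result inside Pre_.
    (s.1, (s.2.1).getD "")

-- ===== PORT B =====
def analizar_inventario_alt (productos : List (String × Int × Int)) : Int × String :=
  if productos = [] then (0, "Sin productos")
  else
    let valor_total := (productos.map (fun x => x.2.1 * x.2.2)).sum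
    -- sorted(productos, key=lambda x: x[2], reverse=True)[0]; productos ≠ [] so the
    -- sorted list is nonempty and the [] branch below is unreachable.
    match PySem.List.sorted productos (fun x => x.2.2) true with
    | [] => (valor_total, "")
    | (nombre, _, precio) :: _ =>
        -- Python's None when the head price is not positive; excluded by Pre_.
        (valor_total, if 0 < precio then nombre else "")

-- ===== PRECONDITION & SPEC =====
-- Pre_ excludes non-empty inputs whose prices are all ≤ 0: there A (and B) return
-- (total, None), which is not a value of the declared Int × String type.
def Pre_analizar_inventario (productos : List (String × Int × Int)) : Prop :=
  (productos.isEmpty || productos.any (fun x => decide (0 < x.2.2))) = true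
instance (productos : List (String × Int × Int)) : Decidable (Pre_analizar_inventario productos) := by
  unfold Pre_analizar_inventario; infer_instance
def pvWitness_analizar_inventario : (List (String × Int × Int)) := [("pan", 3, 2), ("vino", 1, 5)]

def Spec_analizar_inventario (productos : List (String × Int × Int)) (out : Int × String) : Prop := out = analizar_inventario_alt productos
instance (productos : List (String × Int × Int)) (out : Int × String) : Decidable (Spec_analizar_inventario productos out) := by unfold Spec_analizar_inventario; infer_instance

-- ===== CLAIM (what is proved, stated in full; the proofs are below) =====
def Claim_equal_analizar_inventario : Prop := ∀ (productos : List (String × Int × Int)), Dom_analizar_inventario productos → Pre_analizar_inventario productos → Spec_analizar_inventario productos (analizar_inventario productos)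

-- ===== LEMMAS AND PROOFS =====

-- proof-only helpers: the best-so-far part of A's loop, and the "first max" fold.
def bestLoop : List (String × Int × Int) → Option String × Int → Option String × Int
  | [], s => s
  | (nombre, _, precio) :: rest, (b, h) =>
      bestLoop rest (if h < precio then some nombre else b, if h < precio then precio else h)

def bstep (h x : String × Int × Int) : String × Int × Int := if h.2.2 < x.2.2 then x else h

-- relation between A's (best, high) state and the first-max element h
def pvRel (b : Option String) (m : Int) (h : String × Int × Int) : Prop :=
  (0 < h.2.2 → b = some h.1 ∧ m = h.2.2) ∧ (h.2.2 ≤ 0 → b = none ∧ m = 0)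

theorem aLoop_decomp (xs : List (String × Int × Int)) (t : Int) (b : Option String) (h : Int) :
    aLoop xs (t, b, h) = (t + (xs.map (fun x => x.2.1 * x.2.2)).sum, bestLoop xs (b, h)) := by
  induction xs generalizing t b h with
  | nil => simp [aLoop, bestLoop]
  | cons x rest ih =>
      obtain ⟨n, c, p⟩ := x
      simp only [aLoop, bestLoop, ih, List.map_cons, List.sum_cons]
      ring_nf

theorem pvRel_step (b : Option String) (m : Int) (h : String × Int × Int)
    (n : String) (c p : Int) (hr : pvRel b m h) :
    pvRel (if m < p then some n else b) (if m < p then p else m) (bstep h (n, c, p)) := by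
  obtain ⟨h1, h2⟩ := hr
  by_cases hh : 0 < h.2.2
  · obtain ⟨hb, hm⟩ := h1 hh
    subst hb; subst hm
    by_cases hp : h.2.2 < p
    · exact ⟨fun _ => by simp [bstep, hp], fun hle => absurd (lt_trans hh hp) (by simpa [bstep, hp] using not_lt.2 hle)⟩
    · refine ⟨fun _ => by simp [bstep, hp], fun hle => ?_⟩
      simp only [bstep, if_neg hp] at hle
      exact absurd hh (not_lt.2 hle)
  · obtain ⟨hb, hm⟩ := h2 (not_lt.1 hh)
    subst hb; subst hm
    by_cases hp0 : (0:Int) < p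
    · have hp : h.2.2 < p := lt_of_le_of_lt (not_lt.1 hh) hp0
      exact ⟨fun _ => by simp [bstep, hp, hp0], fun hle => absurd hp0 (by simpa [bstep, hp] using not_lt.2 hle)⟩
    · rw [if_neg hp0, if_neg hp0]
      by_cases hp : h.2.2 < p
      · exact ⟨fun hc => absurd (by simpa [bstep, hp] using hc) hp0, fun _ => ⟨rfl, rfl⟩⟩
      · exact ⟨fun hc => absurd (by simpa [bstep, hp] using hc) hh, fun _ => ⟨rfl, rfl⟩⟩

theorem pvRel_fold (xs : List (String × Int × Int)) (b : Option String) (m : Int)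
    (h : String × Int × Int) (hr : pvRel b m h) :
    pvRel (bestLoop xs (b, m)).1 (bestLoop xs (b, m)).2 (xs.foldl bstep h) := by
  induction xs generalizing b m h with
  | nil => exact hr
  | cons x rest ih =>
      obtain ⟨n, c, p⟩ := x
      simp only [bestLoop, List.foldl_cons]
      exact ih _ _ _ (pvRel_step b m h n c p hr)

theorem le_foldl_bstep (xs : List (String × Int × Int)) (h : String × Int × Int) :
    h.2.2 ≤ (xs.foldl bstep h).2.2 := by
  induction xs generalizing h with
  | nil => simp
  | cons x rest ih =>
      simp only [List.foldl_cons]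
      refine le_trans ?_ (ih (bstep h x))
      by_cases hc : h.2.2 < x.2.2 <;> simp [bstep, hc, le_of_lt]

theorem mem_le_foldl_bstep (xs : List (String × Int × Int)) :
    ∀ (h x : String × Int × Int), x ∈ xs → x.2.2 ≤ (xs.foldl bstep h).2.2 := by
  induction xs with
  | nil => intro h x hx; cases hx
  | cons y rest ih =>
      intro h x hx
      simp only [List.foldl_cons]
      rcases List.mem_cons.1 hx with rfl | hx'
      · refine le_trans ?_ (le_foldl_bstep rest (bstep h x))
        by_cases hc : h.2.2 < x.2.2 <;> simp [bstep, hc]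
        exact not_lt.1 hc
      · exact ih (bstep h y) x hx'

-- the head of B's descending stable sort is the foldl-first-max of the list
theorem sorted_rev_head (x0 : String × Int × Int) (xs : List (String × Int × Int)) :
    (PySem.List.sorted (x0 :: xs) (fun x => x.2.2) true).head? = some (xs.foldl bstep x0) := by
  rw [PySem.List.sorted_rev_eq_foldl_insertBy]
  simp only [List.foldl_cons, PySem.List.insertBy]
  -- generalize: for any tail t, the head of the fold over h :: t is foldl bstep h
  suffices H : ∀ (ys : List (String × Int × Int)) (h : String × Int × Int)
      (t : List (String × Int × Int)),
      (ys.foldl (fun acc x => PySem.List.insertBy (fun a b => decide (b.2.2 < a.2.2)) x acc) (h :: t)).head?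
        = some (ys.foldl bstep h) from H xs x0 []
  intro ys
  induction ys with
  | nil => intro h t; rfl
  | cons x rest ih =>
      intro h t
      simp only [List.foldl_cons, PySem.List.insertBy]
      by_cases hc : h.2.2 < x.2.2
      · simpa [hc, bstep] using ih x (h :: t)
      · simpa [hc, bstep] using ih h _

-- ===== VERDICT (by name: the statement is the Claim_ definition above) =====
theorem analizar_inventario_spec : Claim_equal_analizar_inventario := by
  intro productos _ hpre
  unfold Pre_analizar_inventario at hpre
  rw [Bool.or_eq_true, List.isEmpty_iff, List.any_eq_true] at hpre
  unfold Spec_analizar_inventario analizar_inventario analizar_inventario_alt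
  rcases hpre with hnil | ⟨x, hx, hxp⟩
  · simp [hnil]
  · rw [decide_eq_true_iff] at hxp
    have hne : productos ≠ [] := by rintro rfl; exact absurd hx List.not_mem_nil
    obtain ⟨x0, xs, rfl⟩ := List.exists_cons_of_ne_nil hne
    simp only [hne, ite_false]
    -- A's result via the decomposition
    rw [aLoop_decomp]
    -- Rel after the first step of A's loop against h = x0
    have hrel0 : pvRel (if (0:Int) < x0.2.2 then some x0.1 else none)
        (if (0:Int) < x0.2.2 then x0.2.2 else 0) x0 := by
      constructor <;> intro hp
      · simp [hp]
      · simp [not_lt.2 hp]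
    have hrel : pvRel (bestLoop (x0 :: xs) (none, 0)).1 (bestLoop (x0 :: xs) (none, 0)).2
        (xs.foldl bstep x0) := by
      have := pvRel_fold xs _ _ x0 hrel0
      simpa [bestLoop] using this
    -- the final first-max has positive price
    have hpos : 0 < (xs.foldl bstep x0).2.2 := by
      rcases List.mem_cons.1 hx with rfl | hx'
      · exact lt_of_lt_of_le hxp (le_foldl_bstep xs x)
      · exact lt_of_lt_of_le hxp (mem_le_foldl_bstep xs x0 x hx')
    obtain ⟨hb, -⟩ := hrel.1 hpos
    -- B's head
    have hh := sorted_rev_head x0 xs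
    cases hsort : PySem.List.sorted (x0 :: xs) (fun x => x.2.2) true with
    | nil => rw [hsort] at hh; cases hh
    | cons m t =>
        rw [hsort] at hh
        obtain ⟨n, c, p⟩ := m
        have hm : (n, c, p) = xs.foldl bstep x0 := by simpa using hh
        rw [hb]
        have hp' : 0 < p := by rw [show p = (xs.foldl bstep x0).2.2 from by rw [← hm]]; exact hpos
        simp only [hp', ite_true, Option.getD_some]
        rw [show n = (xs.foldl bstep x0).1 from by rw [← hm]]
        simp
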